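-- pv_equiv track=rewrite | github.com/mdickinson/polyhedron | point_in_polyhedron.py | classify_edge
-- ===== SOURCE A (Python) =====
-- def classify_edge(v1, v2, origin):
--     """
--     Classify edge from point v1 in N to point v2 in P,
--     relative to the origin.
--
--     Return a pair (l, r) giving the integer coefficients of L
--     and R in the result.
--
--     """
--     if v2 < origin < v1:
--         x, y = classify_edge(v2, v1, origin)
--         return -x, -y
--
--     if not v1 < origin < v2:
--         raise ValueError("edge not between N and P")
--
--     # CCW rule ignoring 3rd coordinate.
--     y = (v2[0] - origin[0]) * (v1[1] - origin[1]) - (v2[1] - origin[1]) * (v1[0] - origin[0])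
--     if y > 0:
--         return (0, -1)
--     elif y < 0:
--         return (1, 0)
--
--     # Case where v1, v2 and origin are collinear in x-y plane, so
--     # Find z-coordinate of point of intersection.
--
--     # Note that it's not possible for v1 and v2 to both lie on the z-axis,
--     # since then the edge would pass through the origin.
--
--     # Let's assume x-coordinates are distinct.
--     if v1[0] < v2[0]:
--         z = (v2[0] - origin[0]) * (v1[2] - origin[2]) - (v2[2] - origin[2]) * (v1[0] - origin[0])
--     else:
--         z = (v2[1] - origin[1]) * (v1[2] - origin[2]) - (v2[2] - origin[2]) * (v1[1] - origin[1])
--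
--     if z > 0:
--         return (0, -1)
--     elif z < 0:
--         return (1, 0)
--     else:
--         raise ValueError("edge through origin")
-- ===== SOURCE B (Python) =====
-- def classify_edge(v1, v2, origin):
--     """
--     Classify edge from point v1 in N to point v2 in P,
--     relative to the origin.
--
--     Return a pair (l, r) giving the integer coefficients of L
--     and R in the result.
--     """
--     if v1 < origin < v2:
--         sign = 1
--     elif v2 < origin < v1:
--         sign = -1
--     else:
--         raise ValueError("edge not between N and P")
--
--     # Work with origin-relative position vectors p, q and their full 3D
--     # cross product n = q x p, computed once; the classification is read
--     # off from the components of n (nz is the CCW discriminant; -ny / nx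
--     # are the two intersection-z discriminants), scaled by the orientation.
--     px, py, pz = v1[0] - origin[0], v1[1] - origin[1], v1[2] - origin[2]
--     qx, qy, qz = v2[0] - origin[0], v2[1] - origin[1], v2[2] - origin[2]
--     nx, ny, nz = qy * pz - qz * py, qz * px - qx * pz, qx * py - qy * px
--
--     t = nz if nz else (-ny if sign * (v2[0] - v1[0]) > 0 else nx)
--     if t == 0:
--         raise ValueError("edge through origin")
--     return (0, -sign) if sign * t > 0 else (sign, 0)
-- ===== Notes on version B (the rewrite author's own statement) =====
-- stated objective: alternative
-- what changed: Instead of A's self-recursive flip and separate y-then-z return chains on the reoriented pair, B computes the full 3D cross product of the origin-relative vertex vectors once on the original pair and reads the classification off its components (nz, then -ny or nx), folding the orientation into a sign factor and a single final return.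
import Mathlib
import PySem

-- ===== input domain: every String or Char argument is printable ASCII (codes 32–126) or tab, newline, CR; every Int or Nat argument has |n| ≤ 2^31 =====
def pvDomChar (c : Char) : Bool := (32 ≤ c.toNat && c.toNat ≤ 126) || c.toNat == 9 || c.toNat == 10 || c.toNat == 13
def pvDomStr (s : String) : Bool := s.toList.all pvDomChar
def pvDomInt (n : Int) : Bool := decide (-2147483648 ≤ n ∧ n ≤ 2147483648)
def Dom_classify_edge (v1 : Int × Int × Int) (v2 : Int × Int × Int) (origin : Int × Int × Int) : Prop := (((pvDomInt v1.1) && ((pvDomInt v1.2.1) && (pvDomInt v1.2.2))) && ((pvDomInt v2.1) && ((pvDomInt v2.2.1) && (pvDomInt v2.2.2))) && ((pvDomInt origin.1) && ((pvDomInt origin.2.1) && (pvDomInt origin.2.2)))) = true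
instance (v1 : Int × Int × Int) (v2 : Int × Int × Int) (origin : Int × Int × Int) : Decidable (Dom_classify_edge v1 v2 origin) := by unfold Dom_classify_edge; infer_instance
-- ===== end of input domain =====

-- B replaces A's one-level self-recursion and separate y/z return chains by a single
-- straight-line pass: compute the full 3D cross product of the origin-relative vectors
-- once and read the classification off its components, scaled by an orientation sign.

-- Python's lexicographic '<' on 3-tuples of ints (exact).
def pyLt3 (a b : Int × Int × Int) : Bool :=
  decide (a.1 < b.1) || (a.1 == b.1 && (decide (a.2.1 < b.2.1) || (a.2.1 == b.2.1 && decide (a.2.2 < b.2.2))))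

-- needed by classify_edge's termination proof (cited in decreasing_by)
theorem pyLt3_asymm (a b : Int × Int × Int) (h : pyLt3 a b = true) : pyLt3 b a = false := by
  simp [pyLt3] at *; omega

-- ===== PORT A =====
-- A raises ValueError on the two branches marked below; there the port returns the
-- dummy (0, 0); exactly those inputs are excluded by Pre_classify_edge.
def classify_edge (v1 : Int × Int × Int) (v2 : Int × Int × Int) (origin : Int × Int × Int) : Int × Int :=
  if pyLt3 v2 origin && pyLt3 origin v1 then
    let p := classify_edge v2 v1 origin
    (-p.1, -p.2)
  else if !(pyLt3 v1 origin && pyLt3 origin v2) then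
    (0, 0)  -- raise ValueError("edge not between N and P")
  else
    let y := (v2.1 - origin.1) * (v1.2.1 - origin.2.1) - (v2.2.1 - origin.2.1) * (v1.1 - origin.1)
    if y > 0 then (0, -1)
    else if y < 0 then (1, 0)
    else
      let z := if v1.1 < v2.1 then
          (v2.1 - origin.1) * (v1.2.2 - origin.2.2) - (v2.2.2 - origin.2.2) * (v1.1 - origin.1)
        else
          (v2.2.1 - origin.2.1) * (v1.2.2 - origin.2.2) - (v2.2.2 - origin.2.2) * (v1.2.1 - origin.2.1)
      if z > 0 then (0, -1)
      else if z < 0 then (1, 0)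
      else (0, 0)  -- raise ValueError("edge through origin")
termination_by (if pyLt3 v2 origin && pyLt3 origin v1 then 1 else 0 : Nat)
decreasing_by
  rename_i h
  simp only [Bool.and_eq_true] at h
  simp [pyLt3_asymm _ _ h.1, pyLt3_asymm _ _ h.2, h.1, h.2]

-- ===== PORT B =====
-- the straight-line body of Source B after the sign assignment (Source B writes it inline;
-- it is shared here so the two call sites stay literal). The
-- 'raise ValueError("edge through origin")' branch returns the dummy (0, 0).
def pvBody (v1 : Int × Int × Int) (v2 : Int × Int × Int) (origin : Int × Int × Int) (sign : Int) : Int × Int :=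
  let px := v1.1 - origin.1
  let py := v1.2.1 - origin.2.1
  let pz := v1.2.2 - origin.2.2
  let qx := v2.1 - origin.1
  let qy := v2.2.1 - origin.2.1
  let qz := v2.2.2 - origin.2.2
  let nx := qy * pz - qz * py
  let ny := qz * px - qx * pz
  let nz := qx * py - qy * px
  let t := if nz ≠ 0 then nz else (if sign * (v2.1 - v1.1) > 0 then -ny else nx)
  if t = 0 then (0, 0)  -- raise ValueError("edge through origin")
  else if sign * t > 0 then (0, -sign) else (sign, 0)

-- the 'raise ValueError("edge not between N and P")' branch returns the dummy (0, 0)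
def classify_edge_alt (v1 : Int × Int × Int) (v2 : Int × Int × Int) (origin : Int × Int × Int) : Int × Int :=
  if pyLt3 v1 origin && pyLt3 origin v2 then
    pvBody v1 v2 origin 1
  else if pyLt3 v2 origin && pyLt3 origin v1 then
    pvBody v1 v2 origin (-1)
  else
    (0, 0)

-- ===== PRECONDITION & SPEC =====
-- cross products used only to state the precondition (they mirror A's formulas)
def pvY (a b o : Int × Int × Int) : Int :=
  (b.1 - o.1) * (a.2.1 - o.2.1) - (b.2.1 - o.2.1) * (a.1 - o.1)
def pvZ (a b o : Int × Int × Int) : Int :=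
  if a.1 < b.1 then (b.1 - o.1) * (a.2.2 - o.2.2) - (b.2.2 - o.2.2) * (a.1 - o.1)
  else (b.2.1 - o.2.1) * (a.2.2 - o.2.2) - (b.2.2 - o.2.2) * (a.2.1 - o.2.1)

-- Pre_ excludes exactly the inputs on which A raises ValueError: edges that do not lie
-- lexicographically strictly on both sides of the origin, and collinear edges through
-- the origin (both cross products zero on the oriented pair). B raises there too.
def Pre_classify_edge (v1 : Int × Int × Int) (v2 : Int × Int × Int) (origin : Int × Int × Int) : Prop :=
  ((pyLt3 v1 origin && pyLt3 origin v2) = true ∧ ¬(pvY v1 v2 origin = 0 ∧ pvZ v1 v2 origin = 0)) ∨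
  ((pyLt3 v2 origin && pyLt3 origin v1) = true ∧ ¬(pvY v2 v1 origin = 0 ∧ pvZ v2 v1 origin = 0))
instance (v1 : Int × Int × Int) (v2 : Int × Int × Int) (origin : Int × Int × Int) : Decidable (Pre_classify_edge v1 v2 origin) := by unfold Pre_classify_edge; infer_instance

def pvWitness_classify_edge : (Int × Int × Int) × (Int × Int × Int) × (Int × Int × Int) :=
  ((-1, 0, 0), (1, 1, 0), (0, 0, 0))

def Spec_classify_edge (v1 : Int × Int × Int) (v2 : Int × Int × Int) (origin : Int × Int × Int) (out : Int × Int) : Prop := out = classify_edge_alt v1 v2 origin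
instance (v1 : Int × Int × Int) (v2 : Int × Int × Int) (origin : Int × Int × Int) (out : Int × Int) : Decidable (Spec_classify_edge v1 v2 origin out) := by unfold Spec_classify_edge; infer_instance

-- ===== CLAIM (what is proved, stated in full; the proofs are below) =====
def Claim_equal_classify_edge : Prop := ∀ (v1 : Int × Int × Int) (v2 : Int × Int × Int) (origin : Int × Int × Int), Dom_classify_edge v1 v2 origin → Pre_classify_edge v1 v2 origin → Spec_classify_edge v1 v2 origin (classify_edge v1 v2 origin)

-- ===== LEMMAS AND PROOFS =====
-- A's if/elif return chain on the two discriminants, abstracted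
def pvChain (Y Z : Int) : Int × Int :=
  if Y > 0 then (0, -1)
  else if Y < 0 then (1, 0)
  else if Z > 0 then (0, -1)
  else if Z < 0 then (1, 0)
  else (0, 0)

-- value of A on the oriented (non-flipped) branch
theorem classify_edge_fwd (v1 v2 origin : Int × Int × Int)
    (h : (pyLt3 v1 origin && pyLt3 origin v2) = true) :
    classify_edge v1 v2 origin = pvChain (pvY v1 v2 origin) (pvZ v1 v2 origin) := by
  have h1 := pyLt3_asymm _ _ (Bool.and_elim_left h)
  have h2 := pyLt3_asymm _ _ (Bool.and_elim_right h)
  rw [classify_edge]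
  simp only [pvChain, pvY, pvZ, h, h1, h2, Bool.and_false, if_false, Bool.not_true,
    Bool.false_eq_true]
  rfl

theorem pvBody_fwd (v1 v2 origin : Int × Int × Int) :
    pvBody v1 v2 origin 1 = pvChain (pvY v1 v2 origin) (pvZ v1 v2 origin) := by
  simp only [pvBody, pvChain, pvY, pvZ]
  have hzx : -((v2.2.2 - origin.2.2) * (v1.1 - origin.1) - (v2.1 - origin.1) * (v1.2.2 - origin.2.2))
      = (v2.1 - origin.1) * (v1.2.2 - origin.2.2) - (v2.2.2 - origin.2.2) * (v1.1 - origin.1) := by ring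
  have hc : ((1 : Int) * (v2.1 - v1.1) > 0) = (v1.1 < v2.1) := by
    simp
  simp only [hzx, hc]
  by_cases hx : v1.1 < v2.1 <;> simp only [hx, if_true, if_false] <;>
    split_ifs <;> first | rfl | omega

theorem pvBody_bwd (v1 v2 origin : Int × Int × Int) :
    pvBody v1 v2 origin (-1)
      = (-(pvChain (pvY v2 v1 origin) (pvZ v2 v1 origin)).1,
         -(pvChain (pvY v2 v1 origin) (pvZ v2 v1 origin)).2) := by
  simp only [pvBody, pvChain, pvY, pvZ]
  have hY : (v2.1 - origin.1) * (v1.2.1 - origin.2.1) - (v2.2.1 - origin.2.1) * (v1.1 - origin.1)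
      = -((v1.1 - origin.1) * (v2.2.1 - origin.2.1) - (v1.2.1 - origin.2.1) * (v2.1 - origin.1)) := by ring
  have hZx : -((v2.2.2 - origin.2.2) * (v1.1 - origin.1) - (v2.1 - origin.1) * (v1.2.2 - origin.2.2))
      = -((v1.1 - origin.1) * (v2.2.2 - origin.2.2) - (v1.2.2 - origin.2.2) * (v2.1 - origin.1)) := by ring
  have hZy : (v2.2.1 - origin.2.1) * (v1.2.2 - origin.2.2) - (v2.2.2 - origin.2.2) * (v1.2.1 - origin.2.1)
      = -((v1.2.1 - origin.2.1) * (v2.2.2 - origin.2.2) - (v1.2.2 - origin.2.2) * (v2.2.1 - origin.2.1)) := by ring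
  have hc : ((-1 : Int) * (v2.1 - v1.1) > 0) = (v2.1 < v1.1) := by
    rw [eq_iff_iff]; omega
  simp only [hY, hZx, hZy, hc]
  set Y := (v1.1 - origin.1) * (v2.2.1 - origin.2.1) - (v1.2.1 - origin.2.1) * (v2.1 - origin.1) with hy
  set Zx := (v1.1 - origin.1) * (v2.2.2 - origin.2.2) - (v1.2.2 - origin.2.2) * (v2.1 - origin.1) with hzx
  set Zy := (v1.2.1 - origin.2.1) * (v2.2.2 - origin.2.2) - (v1.2.2 - origin.2.2) * (v2.2.1 - origin.2.1) with hzy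
  clear_value Y Zx Zy
  clear hy hzx hzy hY hZx hZy
  by_cases hx : v2.1 < v1.1 <;> simp only [hx, if_true, if_false] <;>
    split_ifs <;> first | rfl | omega

-- ===== VERDICT (by name: the statement is the Claim_ definition above) =====
theorem classify_edge_spec : Claim_equal_classify_edge := by
  intro v1 v2 origin _ _
  unfold Spec_classify_edge classify_edge_alt
  by_cases h1 : (pyLt3 v1 origin && pyLt3 origin v2) = true
  · simp only [h1, if_true]
    rw [classify_edge_fwd v1 v2 origin h1, pvBody_fwd]
  · by_cases h2 : (pyLt3 v2 origin && pyLt3 origin v1) = true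
    · simp only [h1, h2, Bool.false_eq_true, if_false, if_true]
      rw [classify_edge]
      simp only [h2, if_true]
      rw [classify_edge_fwd v2 v1 origin (by rw [Bool.and_elim_left h2, Bool.and_elim_right h2]; rfl),
        pvBody_bwd]
    · rw [classify_edge]
      simp [h1, h2]
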